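-- pv_equiv track=rewrite | github.com/DEL-CAP1007/ipe-ai-terminalv1 | cli/renderers_relations.py | render_relation_graph
-- ===== SOURCE A (Python) =====
-- def render_relation_graph(canonical_id, graph):
--     lines = [f"=== Relationship Graph for {canonical_id} ==="]
--     def recurse(node, depth, prefix):
--         if depth > 0:
--             for rel_type, target in graph.get(node, []):
--                 lines.append(f"{prefix}{node} ──{rel_type}→ {target}")
--                 recurse(target, depth - 1, prefix + "    ")
--     recurse(canonical_id, 2, "")
--     return "\n".join(lines)
-- ===== SOURCE B (Python) =====
-- def render_relation_graph(canonical_id, graph):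
--     # Iterative depth-2 rendering: two explicit nested loops instead of recursion.
--     lines = [f"=== Relationship Graph for {canonical_id} ==="]
--     for rel_type, target in graph.get(canonical_id, []):
--         lines.append(f"{canonical_id} ──{rel_type}→ {target}")
--         for rt2, t2 in graph.get(target, []):
--             lines.append(f"    {target} ──{rt2}→ {t2}")
--     return "\n".join(lines)
-- ===== Notes on version B (the rewrite author's own statement) =====
-- stated objective: simpler
-- what changed: Replaced the nested recursive helper (closure appending to an outer list with a depth counter and growing prefix) by two explicit nested for-loops with a hardcoded inner indent.
import Mathlib
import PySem

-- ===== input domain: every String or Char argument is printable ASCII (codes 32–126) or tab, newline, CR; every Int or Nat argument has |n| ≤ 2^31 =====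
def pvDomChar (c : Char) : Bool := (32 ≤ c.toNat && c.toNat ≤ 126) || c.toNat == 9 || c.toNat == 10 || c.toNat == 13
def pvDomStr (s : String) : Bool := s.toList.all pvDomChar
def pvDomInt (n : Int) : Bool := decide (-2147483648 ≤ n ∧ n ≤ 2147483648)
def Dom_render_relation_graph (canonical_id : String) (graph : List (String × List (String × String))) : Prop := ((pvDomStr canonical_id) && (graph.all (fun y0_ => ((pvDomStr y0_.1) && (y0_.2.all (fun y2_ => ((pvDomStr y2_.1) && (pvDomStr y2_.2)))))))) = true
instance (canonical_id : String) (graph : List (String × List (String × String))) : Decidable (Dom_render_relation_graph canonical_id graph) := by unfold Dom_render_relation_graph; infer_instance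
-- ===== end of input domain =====

-- B replaces A's recursive closure (depth counter + growing prefix) with two explicit nested
-- for-loops and a hardcoded inner indent; same output, simpler decomposition.

-- ===== PORT A =====
-- graph.get(node, []) on the association list (dict in insertion order, first match)
def pvGetRel (graph : List (String × List (String × String))) (node : String) : List (String × String) :=
  (PySem.Dict.mk graph).getD node []

-- the inner 'recurse(node, depth, prefix)' closure; 'lines' is the captured accumulator
def pvRecurseA (graph : List (String × List (String × String))) :
    Nat → String → String → List String → List String
  | 0, _, _, lines => lines
  | d + 1, node, pre, lines =>
      (pvGetRel graph node).foldl
        (fun acc p =>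
          pvRecurseA graph d p.2 (pre ++ "    ")
            (acc ++ [pre ++ node ++ " ──" ++ p.1 ++ "→ " ++ p.2])) lines

def render_relation_graph (canonical_id : String) (graph : List (String × List (String × String))) : String :=
  PySem.Str.join "\n"
    (pvRecurseA graph 2 canonical_id "" ["=== Relationship Graph for " ++ canonical_id ++ " ==="])

-- ===== PORT B =====
def render_relation_graph_alt (canonical_id : String) (graph : List (String × List (String × String))) : String :=
  let lines :=
    (pvGetRel graph canonical_id).foldl
      (fun acc p =>
        let acc := acc ++ [canonical_id ++ " ──" ++ p.1 ++ "→ " ++ p.2]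
        (pvGetRel graph p.2).foldl
          (fun a q => a ++ ["    " ++ p.2 ++ " ──" ++ q.1 ++ "→ " ++ q.2]) acc)
      ["=== Relationship Graph for " ++ canonical_id ++ " ==="]
  PySem.Str.join "\n" lines

-- ===== PRECONDITION & SPEC =====
def Spec_render_relation_graph (canonical_id : String) (graph : List (String × List (String × String))) (out : String) : Prop := out = render_relation_graph_alt canonical_id graph
instance (canonical_id : String) (graph : List (String × List (String × String))) (out : String) : Decidable (Spec_render_relation_graph canonical_id graph out) := by unfold Spec_render_relation_graph; infer_instance

-- ===== CLAIM (what is proved, stated in full; the proofs are below) =====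
def Claim_equal_render_relation_graph : Prop := ∀ (canonical_id : String) (graph : List (String × List (String × String))), Dom_render_relation_graph canonical_id graph → Spec_render_relation_graph canonical_id graph (render_relation_graph canonical_id graph)

-- ===== LEMMAS AND PROOFS =====
theorem pv_empty_append (s : String) : "" ++ s = s := by
  simp

-- depth-1 recursion = a single flat loop (the depth-0 calls are identities)
theorem pvRecurseA_one (graph : List (String × List (String × String)))
    (node pre : String) (lines : List String) :
    pvRecurseA graph 1 node pre lines
      = (pvGetRel graph node).foldl
          (fun acc p => acc ++ [pre ++ node ++ " ──" ++ p.1 ++ "→ " ++ p.2]) lines := by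
  simp only [pvRecurseA]

theorem render_relation_graph_spec : Claim_equal_render_relation_graph := by
  intro c g _
  show render_relation_graph c g = render_relation_graph_alt c g
  unfold render_relation_graph render_relation_graph_alt
  refine congrArg (PySem.Str.join "\n") ?_
  show (pvGetRel g c).foldl
      (fun acc p =>
        pvRecurseA g 1 p.2 ("" ++ "    ")
          (acc ++ ["" ++ c ++ " ──" ++ p.1 ++ "→ " ++ p.2])) _ = _
  apply PySem.List.foldl_congr_mem
  intro acc p _
  rw [pvRecurseA_one, pv_empty_append]
  simp only [pv_empty_append]
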